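-- pv_equiv track=rewrite | github.com/thaheer-uzamaki/Code | First reverse.py | first_reverse
-- ===== SOURCE A (Python) =====
-- def first_reverse(string):
--     character=''
--     for char in string[::-1]:
--         character+=char
--     res=character+token
--     res_list=list(res)
--     for i in range(2,len(res),3):
--         res_list[i]='x'
--     res=''.join(res_list)
--     return res
--
-- token='abdef'
-- ===== SOURCE B (Python) =====
-- token = 'abdef'
--
-- def first_reverse(string):
--     full = string[::-1] + token
--     parts = []
--     for i in range(0, len(full), 3):
--         chunk = full[i:i+3]
--         parts.append(chunk[:2] + 'x' if len(chunk) == 3 else chunk)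
--     return ''.join(parts)
-- ===== Notes on version B (the rewrite author's own statement) =====
-- stated objective: simpler
-- what changed: B reverses via a slice and rebuilds the result from 3-char chunks (emitting chunk[:2]+'x' for each full chunk, the short tail unchanged) instead of A's char-by-char concat loop plus stride-3 index mutation of a char list.
import Mathlib
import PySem

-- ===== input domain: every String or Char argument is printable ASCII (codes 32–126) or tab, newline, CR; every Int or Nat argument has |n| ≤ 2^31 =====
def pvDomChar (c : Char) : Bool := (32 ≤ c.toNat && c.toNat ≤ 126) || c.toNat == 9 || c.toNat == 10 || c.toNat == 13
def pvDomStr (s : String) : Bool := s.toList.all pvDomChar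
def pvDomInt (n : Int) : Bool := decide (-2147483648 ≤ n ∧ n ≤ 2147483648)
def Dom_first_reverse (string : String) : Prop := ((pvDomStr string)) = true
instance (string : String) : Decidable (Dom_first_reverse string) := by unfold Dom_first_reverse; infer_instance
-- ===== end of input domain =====

-- B reverses with a slice, appends the token once, and rebuilds the string from 3-char chunks
-- (chunk[:2]+'x' for full chunks) instead of mutating a char list at stride-3 indices: simpler, same cost.

-- module-level constant token = 'abdef'
def pvToken : String := "abdef"

-- ===== PORT A =====
def first_reverse (string : String) : String :=
  let revChars : List Char := (PySem.List.slice? string.toList none none (-1)).getD []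
  let character : List Char := revChars.foldl (fun acc c => acc ++ [c]) []
  let res : List Char := character ++ pvToken.toList
  let resList : List Char :=
    (PySem.List.pyRange 2 (res.length : Int) 3).foldl (fun l i => l.set i.toNat 'x') res
  String.ofList resList

-- ===== PORT B =====
def first_reverse_alt (string : String) : String :=
  let full : List Char := ((PySem.List.slice? string.toList none none (-1)).getD []) ++ pvToken.toList
  let parts : List (List Char) :=
    (PySem.List.pyRange 0 (full.length : Int) 3).foldl
      (fun acc i =>
        let chunk := PySem.List.slice full (some i) (some (i + 3))
        acc ++ [if chunk.length = 3 then PySem.List.slice chunk none (some 2) ++ ['x'] else chunk]) []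
  String.ofList parts.flatten

-- ===== PRECONDITION & SPEC =====
def Spec_first_reverse (string : String) (out : String) : Prop := out = first_reverse_alt string
instance (string : String) (out : String) : Decidable (Spec_first_reverse string out) := by unfold Spec_first_reverse; infer_instance

-- ===== CLAIM (what is proved, stated in full; the proofs are below) =====
def Claim_equal_first_reverse : Prop := ∀ (string : String), Dom_first_reverse string → Spec_first_reverse string (first_reverse string)

-- ===== LEMMAS AND PROOFS =====

-- the common result: every third char (index ≡ 2 mod 3) replaced by 'x', trailing short group untouched
def markB : List Char → List Char
  | [] => []
  | [a] => [a]
  | [a, b] => [a, b]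
  | a :: b :: _ :: rest => a :: b :: 'x' :: markB rest

def chunksOf : List Char → List (List Char)
  | [] => []
  | [a] => [[a]]
  | [a, b] => [[a, b]]
  | a :: b :: _ :: rest => [a, b, 'x'] :: chunksOf rest

def procChunk (c : List Char) : List Char :=
  if c.length = 3 then c.take 2 ++ ['x'] else c

theorem foldl_append_singleton (l init : List Char) :
    l.foldl (fun acc c => acc ++ [c]) init = init ++ l := by
  induction l generalizing init with
  | nil => simp
  | cons a t ih => simp [List.foldl, ih]

theorem shiftSet (L : List Nat) (x y z : Char) (t : List Char) :
    List.foldl (fun l k => l.set (2 + 3 * (k + 1)) 'x') (x :: y :: z :: t) L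
      = x :: y :: z :: List.foldl (fun l k => l.set (2 + 3 * k) 'x') t L := by
  induction L generalizing t with
  | nil => rfl
  | cons i L ih =>
    simp only [List.foldl]
    have h : 2 + 3 * (i + 1) = ((2 + 3 * i) + 1 + 1) + 1 := by ring
    rw [h, List.set_cons_succ, List.set_cons_succ, List.set_cons_succ, ih]

theorem setfold_nat : ∀ res : List Char,
    List.foldl (fun l k => l.set (2 + 3 * k) 'x') res (List.range (res.length / 3)) = markB res := by
  intro res
  induction res using markB.induct with
  | case1 => rfl
  | case2 a => norm_num [markB]
  | case3 a b => norm_num [markB]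
  | case4 a b c rest ih =>
    have hlen : (a :: b :: c :: rest).length / 3 = rest.length / 3 + 1 := by
      simp [List.length]; omega
    rw [hlen, List.range_succ_eq_map, List.foldl_cons, List.foldl_map]
    have hset : (a :: b :: c :: rest).set 2 'x' = a :: b :: 'x' :: rest := rfl
    rw [hset]
    have hfun : (fun (l : List Char) (k : Nat) => l.set (2 + 3 * Nat.succ k) 'x')
        = fun l k => l.set (2 + 3 * (k + 1)) 'x' := rfl
    rw [hfun, shiftSet, ih, markB]

theorem shiftChunk (L : List Nat) (x y z : Char) (t : List Char)
    (g : List Char → List Char) (acc : List (List Char)) :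
    List.foldl (fun acc k => acc ++ [g (((x :: y :: z :: t).drop (3 * (k + 1))).take 3)]) acc L
      = List.foldl (fun acc k => acc ++ [g ((t.drop (3 * k)).take 3)]) acc L := by
  induction L generalizing acc with
  | nil => rfl
  | cons i L ih =>
    simp only [List.foldl]
    have h : 3 * (i + 1) = ((3 * i) + 1 + 1) + 1 := by ring
    rw [h, List.drop_succ_cons, List.drop_succ_cons, List.drop_succ_cons, ih]

theorem chunkfold_nat : ∀ (t : List Char) (acc : List (List Char)),
    List.foldl (fun acc k => acc ++ [procChunk ((t.drop (3 * k)).take 3)]) acc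
        (List.range ((t.length + 2) / 3))
      = acc ++ chunksOf t := by
  intro t
  induction t using chunksOf.induct with
  | case1 => intro acc; simp [chunksOf]
  | case2 a => intro acc; norm_num [chunksOf, procChunk, List.range_succ]
  | case3 a b => intro acc; norm_num [chunksOf, procChunk, List.range_succ]
  | case4 a b c rest ih =>
    intro acc
    have hlen : ((a :: b :: c :: rest).length + 2) / 3 = (rest.length + 2) / 3 + 1 := by
      simp [List.length]; omega
    rw [hlen, List.range_succ_eq_map, List.foldl_cons, List.foldl_map]
    have h0 : procChunk (((a :: b :: c :: rest).drop (3 * 0)).take 3) = [a, b, 'x'] := by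
      simp [procChunk]
    rw [h0]
    have hfun : (fun (acc : List (List Char)) (k : Nat) =>
          acc ++ [procChunk (((a :: b :: c :: rest).drop (3 * Nat.succ k)).take 3)])
        = fun acc k =>
          acc ++ [procChunk (((a :: b :: c :: rest).drop (3 * (k + 1))).take 3)] := rfl
    rw [hfun, shiftChunk, ih, chunksOf, List.append_assoc]
    rfl

theorem flatten_chunksOf : ∀ t : List Char, (chunksOf t).flatten = markB t := by
  intro t
  induction t using chunksOf.induct with
  | case1 => rfl
  | case2 a => rfl
  | case3 a b => rfl
  | case4 a b c rest ih => simp [chunksOf, markB, ih]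

theorem first_reverse_eq_mark (s : String) :
    first_reverse s = String.ofList (markB (s.toList.reverse ++ pvToken.toList)) := by
  unfold first_reverse
  rw [PySem.List.slice?_none_none_neg_one]
  simp only [Option.getD_some]
  rw [foldl_append_singleton]
  simp only [List.nil_append]
  set res := s.toList.reverse ++ pvToken.toList with hres
  rw [PySem.List.pyRange_of_pos 2 (res.length : Int) (by norm_num : (0:Int) < 3)]
  have hn : (if (2:Int) < (res.length : Int)
      then (((res.length : Int) - 2 + 3 - 1) / 3).toNat else 0) = res.length / 3 := by
    split_ifs with h <;> omega
  rw [hn, List.foldl_map]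
  have hfun : (fun (l : List Char) (k : Nat) => l.set (2 + 3 * (k : Int)).toNat 'x')
      = fun l k => l.set (2 + 3 * k) 'x' := by
    funext l k
    congr 1
  rw [hfun, setfold_nat]

theorem first_reverse_alt_eq_mark (s : String) :
    first_reverse_alt s = String.ofList (markB (s.toList.reverse ++ pvToken.toList)) := by
  unfold first_reverse_alt
  rw [PySem.List.slice?_none_none_neg_one]
  simp only [Option.getD_some]
  set full := s.toList.reverse ++ pvToken.toList with hfull
  rw [PySem.List.pyRange_of_pos 0 (full.length : Int) (by norm_num : (0:Int) < 3)]
  have hn : (if (0:Int) < (full.length : Int)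
      then (((full.length : Int) - 0 + 3 - 1) / 3).toNat else 0) = (full.length + 2) / 3 := by
    split_ifs with h <;> omega
  rw [hn, List.foldl_map]
  have hfun : (fun (acc : List (List Char)) (k : Nat) =>
        let chunk := PySem.List.slice full (some (0 + 3 * (k : Int))) (some (0 + 3 * (k : Int) + 3))
        acc ++ [if chunk.length = 3 then PySem.List.slice chunk none (some 2) ++ ['x'] else chunk])
      = fun acc k => acc ++ [procChunk ((full.drop (3 * k)).take 3)] := by
    funext acc k
    simp only []
    have h2 : (0 + 3 * (k : Int) + 3) = (((3 * k + 3 : Nat)) : Int) := by push_cast; ring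
    have h1 : (0 + 3 * (k : Int)) = ((3 * k : Nat) : Int) := by push_cast; ring
    rw [h2, h1, PySem.List.slice_natCast]
    have h3 : 3 * k + 3 - 3 * k = 3 := by omega
    rw [h3, procChunk]
    congr 1
    have h4 : PySem.List.slice ((full.drop (3 * k)).take 3) none (some ((2 : Nat) : Int))
        = ((full.drop (3 * k)).take 3).take 2 := PySem.List.slice_to_natCast _ _
    simp only [Nat.cast_ofNat] at h4
    rw [h4]
  rw [hfun, chunkfold_nat, List.nil_append, flatten_chunksOf]

-- ===== VERDICT (by name: the statement is the Claim_ definition above) =====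
theorem first_reverse_spec : Claim_equal_first_reverse := by
  intro s _
  unfold Spec_first_reverse
  rw [first_reverse_eq_mark, first_reverse_alt_eq_mark]
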